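-- pv_equiv track=rewrite | github.com/tamle29092004/CauTrucDuLieu | Session_4/Chương 6/Bai_6_14.py | sinh_loc_phat
-- ===== SOURCE A (Python) =====
-- from collections import deque
--
-- def sinh_loc_phat(N):
--     queue = deque(["6", "8"])  # Bắt đầu với "6" và "8"
--     result = []
--
--     while queue:
--         num = queue.popleft()
--
--         # Nếu độ dài của số nhỏ hơn hoặc bằng N, thêm vào kết quả
--         if len(num) <= N:
--             result.append(num)
--             # Tiếp tục tạo số mới bằng cách thêm "6" hoặc "8"
--             queue.append(num + "6")
--             queue.append(num + "8")
--
--     # Đếm và in ra số lượng số lộc phát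
--     result.sort(reverse=True)  # Sắp xếp theo thứ tự giảm dần
--     return len(result), result
-- ===== SOURCE B (Python) =====
-- def sinh_loc_phat(N):
--     # Build, bottom-up, the list of suffixes in descending lexicographic order
--     # ('8' before '6', longer before its own prefix); prepending "8"/"6" keeps
--     # the order, so the final list is already sorted descending and no sort is
--     # needed.
--     result = []
--     if N >= 1:
--         suffixes = [""]
--         for _ in range(N - 1):
--             suffixes = (["8" + t for t in suffixes]
--                         + ["6" + t for t in suffixes]
--                         + [""])
--         result = ["8" + t for t in suffixes] + ["6" + t for t in suffixes]
--     return len(result), result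
-- ===== Notes on version B (the rewrite author's own statement) =====
-- stated objective: faster
-- what changed: A's BFS over a deque followed by a full descending sort is replaced by a bottom-up rebuild of the suffix list ('8'-prefixed copies, then '6'-prefixed copies, then the empty suffix), which emits the numbers already in descending lexicographic order, so the sort disappears.
import Mathlib
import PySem

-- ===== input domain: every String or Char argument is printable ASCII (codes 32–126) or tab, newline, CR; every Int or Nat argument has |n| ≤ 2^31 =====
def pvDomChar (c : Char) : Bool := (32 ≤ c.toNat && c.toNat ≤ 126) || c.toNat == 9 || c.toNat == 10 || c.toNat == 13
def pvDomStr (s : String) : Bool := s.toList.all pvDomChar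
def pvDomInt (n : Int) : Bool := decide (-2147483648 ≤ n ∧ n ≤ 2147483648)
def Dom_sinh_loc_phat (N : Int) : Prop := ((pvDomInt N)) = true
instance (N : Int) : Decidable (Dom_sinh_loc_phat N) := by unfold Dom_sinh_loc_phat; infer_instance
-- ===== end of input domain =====

-- B replaces A's BFS + final descending sort by a post-order DFS ('8'-branch
-- first) that emits the numbers already in descending order (objective: faster,
-- the sort disappears).  A sorts its list in place; equivalence is about the
-- return value.

-- ===== PORT A =====
-- literal port of A's BFS loop: queue and result list; termination measure
-- sums 3^(N+2-len) over the queue.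
def bfsA (N : Int) (queue res : List String) : List String :=
  match queue with
  | [] => res
  | num :: rest =>
    if (num.length : Int) ≤ N then
      bfsA N (rest ++ [num ++ "6", num ++ "8"]) (res ++ [num])
    else
      bfsA N rest res
termination_by (queue.map (fun s => 3 ^ ((N + 2 - (s.length : Int)).toNat))).sum
decreasing_by
  · rename_i h
    simp only [List.map_append, List.sum_append, List.map_cons, List.map_nil,
      List.sum_cons, List.sum_nil, String.length_append]
    have h1 : (("6" : String).length) = 1 := rfl
    have h2 : (("8" : String).length) = 1 := rfl
    rw [h1, h2]
    have hk : ((N + 2 - ((num.length : Int) + 1)).toNat) + 1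
        = (N + 2 - (num.length : Int)).toNat := by
      omega
    have hp : 0 < 3 ^ ((N + 2 - ((num.length : Int) + 1)).toNat) :=
      pow_pos (by norm_num) _
    rw [← hk, pow_succ]
    push_cast
    omega
  · simp only [List.map_cons, List.sum_cons]
    have hp : 0 < 3 ^ ((N + 2 - ((num.length : Int))).toNat) :=
      pow_pos (by norm_num) _
    omega

def sinh_loc_phat (N : Int) : Int × List String :=
  let res := bfsA N ["6", "8"] []
  let r := PySem.List.sorted res (fun x => x) true
  ((r.length : Int), r)

-- ===== PORT B =====
-- literal port of B: the suffix list is rebuilt N-1 times bottom-up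
-- ('8'-prefixed copies, then '6'-prefixed copies, then ""), then prefixed
-- once more with "8" and "6" to give the result.
def loopB : Nat → List String → List String
  | 0, suffixes => suffixes
  | k + 1, suffixes =>
    loopB k (suffixes.map (fun t => "8" ++ t) ++ (suffixes.map (fun t => "6" ++ t) ++ [""]))

def sinh_loc_phat_alt (N : Int) : Int × List String :=
  let result :=
    if 1 ≤ N then
      let suffixes := loopB (N - 1).toNat [""]
      suffixes.map (fun t => "8" ++ t) ++ suffixes.map (fun t => "6" ++ t)
    else []
  ((result.length : Int), result)

-- ===== PRECONDITION & SPEC =====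
def Spec_sinh_loc_phat (N : Int) (out : Int × List String) : Prop := out = sinh_loc_phat_alt N
instance (N : Int) (out : Int × List String) : Decidable (Spec_sinh_loc_phat N out) := by unfold Spec_sinh_loc_phat; infer_instance

-- ===== CLAIM (what is proved, stated in full; the proofs are below) =====
def Claim_equal_sinh_loc_phat : Prop := ∀ (N : Int), Dom_sinh_loc_phat N → Spec_sinh_loc_phat N (sinh_loc_phat N)

-- ===== LEMMAS AND PROOFS =====

-- the descending-order family: all extensions of p by '6'/'8' up to k more
-- characters, in descending lexicographic order, p itself last
def T : Nat → String → List String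
  | 0, p => [p]
  | k + 1, p => T k (p ++ "8") ++ (T k (p ++ "6") ++ [p])

theorem toList_append8 (p : String) : (p ++ "8").toList = p.toList ++ ['8'] := by simp
theorem toList_append6 (p : String) : (p ++ "6").toList = p.toList ++ ['6'] := by simp
theorem length_append1 (p : String) (c : String) (h : c.length = 1) :
    ((p ++ c).length : Int) = (p.length : Int) + 1 := by
  rw [String.length_append, h]; push_cast; ring

-- one pass of B's loop, and the suffix list after k passes
def stepB (s : List String) : List String :=
  s.map (fun t => "8" ++ t) ++ (s.map (fun t => "6" ++ t) ++ [""])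

def WB : Nat → List String
  | 0 => [""]
  | k + 1 => stepB (WB k)

theorem loopB_stepB : ∀ (k : Nat) (s : List String), loopB k (stepB s) = stepB (loopB k s) := by
  intro k
  induction k with
  | zero => intro s; rfl
  | succ k ih =>
    intro s
    show loopB k (stepB (stepB s)) = stepB (loopB k (stepB s))
    exact ih (stepB s)

theorem loopB_WB : ∀ (k : Nat), loopB k [""] = WB k := by
  intro k
  induction k with
  | zero => rfl
  | succ k ih =>
    show loopB k (stepB [""]) = WB (k + 1)
    rw [loopB_stepB, ih]
    rfl

theorem T_eq_map : ∀ (k : Nat) (p : String), T k p = (WB k).map (fun t => p ++ t) := by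
  intro k
  induction k with
  | zero =>
    intro p
    show [p] = [p ++ ""]
    simp
  | succ k ih =>
    intro p
    show T k (p ++ "8") ++ (T k (p ++ "6") ++ [p]) = (stepB (WB k)).map (fun t => p ++ t)
    rw [ih (p ++ "8"), ih (p ++ "6")]
    simp only [stepB, List.map_append, List.map_map, List.map_cons, List.map_nil]
    simp [Function.comp_def, String.append_assoc]

-- the multiset of numbers A's BFS emits from one queue entry
def SubL (N : Int) (s : String) : List String :=
  if (s.length : Int) ≤ N then T ((N - (s.length : Int)).toNat) s else []

theorem bfsA_perm : ∀ (N : Int) (q res : List String),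
    (bfsA N q res).Perm (res ++ q.flatMap (SubL N)) := by
  intro N q res
  induction q, res using bfsA.induct (N := N) with
  | case1 res => simp [bfsA]
  | case2 res num rest h ih =>
    rw [bfsA, if_pos h]
    refine ih.trans ?_
    simp only [List.flatMap_cons, List.flatMap_append, List.flatMap_nil]
    rw [← Multiset.coe_eq_coe]
    simp only [← Multiset.coe_add, ← List.append_assoc]
    by_cases hlt : ((num.length : Int) + 1) ≤ N
    · have h8 : ((num ++ "8").length : Int) = (num.length : Int) + 1 := length_append1 _ _ rfl
      have h6 : ((num ++ "6").length : Int) = (num.length : Int) + 1 := length_append1 _ _ rfl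
      obtain ⟨m, hm⟩ : ∃ m, (N - (num.length : Int)).toNat = m + 1 :=
        ⟨(N - (num.length : Int)).toNat - 1, by omega⟩
      have hs : SubL N num = T m (num ++ "8") ++ (T m (num ++ "6") ++ [num]) := by
        rw [SubL, if_pos h, hm]; rfl
      have hs8 : SubL N (num ++ "8") = T m (num ++ "8") := by
        rw [SubL, if_pos (by omega), h8]
        congr 1
        omega
      have hs6 : SubL N (num ++ "6") = T m (num ++ "6") := by
        rw [SubL, if_pos (by omega), h6]
        congr 1
        omega
      rw [hs, hs8, hs6]
      simp only [← Multiset.coe_add]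
      abel
    · have hs : SubL N num = [num] := by
        have : (N - (num.length : Int)).toNat = 0 := by omega
        rw [SubL, if_pos h, this]; rfl
      have h8 : ((num ++ "8").length : Int) = (num.length : Int) + 1 := length_append1 _ _ rfl
      have h6 : ((num ++ "6").length : Int) = (num.length : Int) + 1 := length_append1 _ _ rfl
      have hs8 : SubL N (num ++ "8") = [] := by rw [SubL, if_neg (by omega)]
      have hs6 : SubL N (num ++ "6") = [] := by rw [SubL, if_neg (by omega)]
      rw [hs, hs8, hs6]
      abel
  | case3 res num rest h ih =>
    rw [bfsA, if_neg h]
    refine ih.trans ?_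
    have hs : SubL N num = [] := by rw [SubL, if_neg h]
    simp [hs]

-- every element of T k p extends p
theorem T_prefix : ∀ (k : Nat) (p : String) (x : String), x ∈ T k p →
    ∃ s, x.toList = p.toList ++ s := by
  intro k
  induction k with
  | zero =>
    intro p x hx
    simp [T] at hx
    exact ⟨[], by simp [hx]⟩
  | succ k ih =>
    intro p x hx
    simp only [T, List.mem_append, List.mem_singleton] at hx
    rcases hx with h8 | h6 | hp
    · obtain ⟨s, hs⟩ := ih _ _ h8
      exact ⟨'8' :: s, by rw [hs, toList_append8]; simp⟩
    · obtain ⟨s, hs⟩ := ih _ _ h6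
      exact ⟨'6' :: s, by rw [hs, toList_append6]; simp⟩
    · exact ⟨[], by simp [hp]⟩

theorem lex_append_cons_lt (l : List Char) (a b : Char) (s t : List Char) (h : a < b) :
    l ++ a :: s < l ++ b :: t := by
  induction l with
  | nil => exact List.cons_lt_cons_iff.mpr (Or.inl h)
  | cons c l ih => exact List.cons_lt_cons_iff.mpr (Or.inr ⟨rfl, ih⟩)

theorem lex_self_append_cons (l : List Char) (a : Char) (s : List Char) :
    l < l ++ a :: s := by
  induction l with
  | nil => exact List.nil_lt_cons a s
  | cons c l ih => exact List.cons_lt_cons_iff.mpr (Or.inr ⟨rfl, ih⟩)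

theorem lt_of_mem_T8_T6 (k : Nat) (p : String) (x y : String)
    (hx : x ∈ T k (p ++ "8")) (hy : y ∈ T k (p ++ "6")) : y < x := by
  obtain ⟨s, hs⟩ := T_prefix _ _ _ hx
  obtain ⟨t, ht⟩ := T_prefix _ _ _ hy
  rw [toList_append8] at hs
  rw [toList_append6] at ht
  rw [String.lt_iff_toList_lt, hs, ht]
  simpa using lex_append_cons_lt p.toList '6' '8' t s (by decide)

theorem lt_of_mem_T_ext (k : Nat) (p : String) (c : String) (hc : c.toList = ['8'] ∨ c.toList = ['6'])
    (x : String) (hx : x ∈ T k (p ++ c)) : p < x := by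
  obtain ⟨s, hs⟩ := T_prefix _ _ _ hx
  have hpc : (p ++ c).toList = p.toList ++ c.toList := by simp
  rw [String.lt_iff_toList_lt, hs, hpc]
  rcases hc with h | h
  · rw [h, List.append_assoc, List.singleton_append]
    exact lex_self_append_cons p.toList _ s
  · rw [h, List.append_assoc, List.singleton_append]
    exact lex_self_append_cons p.toList _ s

theorem pairwise_T : ∀ (k : Nat) (p : String), (T k p).Pairwise (fun a b => b < a) := by
  intro k
  induction k with
  | zero => intro p; simp [T]
  | succ k ih =>
    intro p
    rw [T, List.pairwise_append]
    refine ⟨ih _, ?_, ?_⟩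
    · rw [List.pairwise_append]
      refine ⟨ih _, by simp, ?_⟩
      intro x hx y hy
      simp only [List.mem_singleton] at hy
      rw [hy]
      exact lt_of_mem_T_ext k p "6" (Or.inr rfl) x hx
    · intro x hx y hy
      rcases List.mem_append.mp hy with h6 | hp
      · exact lt_of_mem_T8_T6 k p x y hx h6
      · simp only [List.mem_singleton] at hp
        rw [hp]
        exact lt_of_mem_T_ext k p "8" (Or.inl rfl) x hx

theorem pairwise_B (n : Nat) :
    (T n "8" ++ T n "6").Pairwise (fun a b => b < a) := by
  rw [List.pairwise_append]
  refine ⟨pairwise_T n _, pairwise_T n _, ?_⟩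
  intro x hx y hy
  have h8 : ("8" : String) = "" ++ "8" := rfl
  have h6 : ("6" : String) = "" ++ "6" := rfl
  rw [h8] at hx; rw [h6] at hy
  exact lt_of_mem_T8_T6 n "" x y hx hy

theorem bfsA_neg (N : Int) (h : N < 1) : bfsA N ["6", "8"] [] = [] := by
  have h6 : ("6" : String).length = 1 := rfl
  have h8 : ("8" : String).length = 1 := rfl
  rw [bfsA, if_neg (by rw [h6]; omega)]
  rw [bfsA, if_neg (by rw [h8]; omega)]
  rw [bfsA]

-- ===== VERDICT (by name: the statement is the Claim_ definition above) =====
theorem sinh_loc_phat_spec : Claim_equal_sinh_loc_phat := by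
  intro N _
  unfold Spec_sinh_loc_phat sinh_loc_phat sinh_loc_phat_alt
  by_cases h1 : 1 ≤ N
  · have hl8 : ("8" : String).length = 1 := rfl
    have hl6 : ("6" : String).length = 1 := rfl
    have hB : ((loopB (N - 1).toNat [""]).map (fun t => "8" ++ t)
          ++ (loopB (N - 1).toNat [""]).map (fun t => "6" ++ t))
        = T (N - 1).toNat "8" ++ T (N - 1).toNat "6" := by
      rw [loopB_WB, ← T_eq_map, ← T_eq_map]
    have hperm : (T (N - 1).toNat "8" ++ T (N - 1).toNat "6").Perm (bfsA N ["6", "8"] []) := by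
      have h := bfsA_perm N ["6", "8"] []
      have hs6 : SubL N "6" = T (N - 1).toNat "6" := by
        rw [SubL, if_pos (by rw [hl6]; omega), hl6]
        congr 1
      have hs8 : SubL N "8" = T (N - 1).toNat "8" := by
        rw [SubL, if_pos (by rw [hl8]; omega), hl8]
        congr 1
      simp only [List.flatMap_cons, List.flatMap_nil, List.nil_append, List.append_nil,
        hs6, hs8] at h
      exact (List.perm_append_comm.trans h.symm)
    have hA : PySem.List.sorted (bfsA N ["6", "8"] []) (fun x => x) true
        = T (N - 1).toNat "8" ++ T (N - 1).toNat "6" :=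
      PySem.List.sorted_rev_eq_of_perm_of_pairwise_gt _ _ _ hperm (pairwise_B _)
    simp only [hA, hB, if_pos h1]
  · rw [bfsA_neg N (by omega)]
    simp [if_neg h1, PySem.List.sorted]
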